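-- pv_equiv track=rewrite | github.com/pr28416/Garage | SubsetSums_sol.py | numberOfSubsets
-- ===== SOURCE A (Python) =====
-- def numberOfSubsets(N):
--     if N*(N+1)%4 != 0: return 0
--     dp = [0] * (N*(N+1)//2+1)
--     dp[0] = 1
--     for newNum in range(1, N+1):
--         for totalSum in range(newNum*(newNum+1)//2, newNum-1, -1):
--             dp[totalSum] += dp[totalSum-newNum]
--     return dp[N*(N+1)//4]//2
-- ===== SOURCE B (Python) =====
-- def numberOfSubsets(N):
--     # Top-down memoized recursion instead of A's bottom-up in-place DP table.
--     if N*(N+1) % 4 != 0: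
--         return 0
--     target = N*(N+1)//4
--     memo = {}
--     def count(i, t):
--         if t == 0:
--             return 1
--         if i <= 0:
--             return 0
--         if t < 0:
--             return 0
--         if (i, t) not in memo:
--             memo[(i, t)] = count(i-1, t) + count(i-1, t-i)
--         return memo[(i, t)]
--     return count(N, target)//2
-- ===== Notes on version B (the rewrite author's own statement) =====
-- stated objective: alternative
-- what changed: Replaces A's bottom-up in-place DP over a full-sum-size array (nested descending index loops) with a top-down memoized recursion count(i, t) = count(i-1, t) + count(i-1, t-i) on (largest element, remaining target), keyed by a dict.
import Mathlib
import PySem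

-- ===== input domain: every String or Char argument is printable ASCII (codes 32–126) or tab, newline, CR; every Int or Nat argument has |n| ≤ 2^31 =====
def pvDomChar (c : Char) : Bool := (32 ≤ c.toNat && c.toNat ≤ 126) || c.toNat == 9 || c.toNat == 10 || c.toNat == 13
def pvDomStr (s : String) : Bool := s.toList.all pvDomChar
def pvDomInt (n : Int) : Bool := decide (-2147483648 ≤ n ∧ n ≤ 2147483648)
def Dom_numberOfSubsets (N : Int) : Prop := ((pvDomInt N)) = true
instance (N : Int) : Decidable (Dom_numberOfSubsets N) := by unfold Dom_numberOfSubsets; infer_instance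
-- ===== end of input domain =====

-- B re-implements A's bottom-up in-place DP as a top-down memoized recursion on (i, target); equal return values, proved below.

-- ===== PORT A =====
-- Literal port of A: guard, dp = [0]*(N*(N+1)//2+1), dp[0] = 1, nested in-place loops, dp[N*(N+1)//4]//2.
-- Python's list here is a mutable array, ported as Array Int; every index A uses is provably in
-- [0, len(dp)), so `.toNat` + getD/setIfInBounds compute exactly Python's dp[i] reads/writes there.
def numberOfSubsets (N : Int) : Int :=
  if PySem.Int.mod (N * (N + 1)) 4 ≠ 0 then 0
  else
    let dp0 : Array Int := Array.replicate (PySem.Int.floordiv (N * (N + 1)) 2 + 1).toNat 0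
    let dp1 := dp0.setIfInBounds (0 : Int).toNat 1
    let dp :=
      (PySem.List.pyRange 1 (N + 1) 1).foldl
        (fun dp newNum =>
          (PySem.List.pyRange (PySem.Int.floordiv (newNum * (newNum + 1)) 2) (newNum - 1) (-1)).foldl
            (fun dp totalSum =>
              dp.setIfInBounds totalSum.toNat
                (dp.getD totalSum.toNat 0 + dp.getD (totalSum - newNum).toNat 0))
            dp)
        dp1
    PySem.Int.floordiv (dp.getD (PySem.Int.floordiv (N * (N + 1)) 4).toNat 0) 2

-- ===== PORT B =====
-- count(i, t) with its memo dict, returning the (value, memo) pair (the map threads Python's mutable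
-- closure state).  The Python dict is only ever a memo lookup table (its iteration order is never
-- consumed), so Std.HashMap is an exact port of it.
def pvCount (i t : Int) (memo : Std.HashMap (Int × Int) Int) : Int × Std.HashMap (Int × Int) Int :=
  if t = 0 then (1, memo)
  else if i ≤ 0 then (0, memo)
  else if t < 0 then (0, memo)
  else
    match memo[(i, t)]? with
    | some v => (v, memo)
    | none =>
        let r1 := pvCount (i - 1) t memo
        let r2 := pvCount (i - 1) (t - i) r1.2
        let v := r1.1 + r2.1
        (v, r2.2.insert (i, t) v)
termination_by i.toNat
decreasing_by all_goals omega

def numberOfSubsets_alt (N : Int) : Int :=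
  if PySem.Int.mod (N * (N + 1)) 4 ≠ 0 then 0
  else
    PySem.Int.floordiv
      (pvCount N (PySem.Int.floordiv (N * (N + 1)) 4) ∅).1 2

-- ===== PRECONDITION & SPEC =====
def Spec_numberOfSubsets (N : Int) (out : Int) : Prop := out = numberOfSubsets_alt N
instance (N : Int) (out : Int) : Decidable (Spec_numberOfSubsets N out) := by unfold Spec_numberOfSubsets; infer_instance

-- ===== CLAIM (what is proved, stated in full; the proofs are below) =====
def Claim_equal_numberOfSubsets : Prop := ∀ (N : Int), Dom_numberOfSubsets N → Spec_numberOfSubsets N (numberOfSubsets N)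

-- ===== LEMMAS AND PROOFS =====

-- The mathematical recurrence both programs compute: number of subsets of {1..i} with sum t.
def pvG (i t : Int) : Int :=
  if t = 0 then 1
  else if i ≤ 0 then 0
  else if t < 0 then 0
  else pvG (i - 1) t + pvG (i - 1) (t - i)
termination_by i.toNat
decreasing_by all_goals omega

lemma pvG_nonpos (i t : Int) (h : i ≤ 0) : pvG i t = if t = 0 then 1 else 0 := by
  rw [pvG]; split_ifs <;> simp_all

-- pvG k s = 0 beyond the maximal reachable sum k*(k+1)/2
lemma pvG_zero_of_big : ∀ (n : Nat) (k s : Int), k.toNat ≤ n → 0 < s → k * (k + 1) < 2 * s → pvG k s = 0 := by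
  intro n
  induction n with
  | zero =>
      intro k s hk hs _
      rw [pvG_nonpos k s (by omega)]
      simp [show s ≠ 0 by omega]
  | succ n ih =>
      intro k s hk hs hbig
      by_cases hk0 : k ≤ 0
      · rw [pvG_nonpos k s hk0]; simp [show s ≠ 0 by omega]
      · rw [pvG]
        have hknn : (1:Int) ≤ k := by omega
        have h1 : pvG (k - 1) s = 0 := by
          apply ih (k - 1) s (by omega) hs
          nlinarith
        have h2 : pvG (k - 1) (s - k) = 0 := by
          apply ih (k - 1) (s - k) (by omega)
          · nlinarith
          · nlinarith
        split_ifs <;> simp_all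
-- below the diagonal the new element cannot be used
lemma pvG_lt (k s : Int) (h0 : 0 ≤ s) (h1 : s < k) : pvG k s = pvG (k - 1) s := by
  by_cases hs : s = 0
  · subst hs; rw [pvG, pvG]; simp
  · rw [pvG]
    have hng : ¬ k ≤ 0 := by omega
    have h2 : pvG (k - 1) (s - k) = 0 := by
      rw [pvG]
      split_ifs with g1 g2 g3 <;> try rfl
      · omega
      · omega
    simp [hs, hng, show ¬ s < 0 by omega, h2]

-- memoisation invariant: every stored value is the pure recurrence's value
def pvInv (m : Std.HashMap (Int × Int) Int) : Prop :=
  ∀ (i t v : Int), m[(i, t)]? = some v → v = pvG i t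

lemma pvCount_spec : ∀ (n : Nat) (i t : Int) (m : Std.HashMap (Int × Int) Int),
    i.toNat ≤ n → pvInv m → (pvCount i t m).1 = pvG i t ∧ pvInv (pvCount i t m).2 := by
  intro n
  induction n with
  | zero =>
      intro i t m hn hm
      rw [pvCount]
      split_ifs with g1 g2 g3
      · exact ⟨by rw [pvG]; simp [g1], hm⟩
      · exact ⟨by rw [pvG]; simp [g1, g2], hm⟩
      · omega
      · omega
  | succ n ih =>
      intro i t m hn hm
      have hguard : ∀ (h1 : ¬ t = 0) (h2 : ¬ i ≤ 0) (h3 : ¬ t < 0),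
          pvG i t = pvG (i - 1) t + pvG (i - 1) (t - i) := by
        intro h1 h2 h3; rw [pvG]; simp [h1, h2, h3]
      rw [pvCount]
      split_ifs with g1 g2 g3
      · exact ⟨by rw [pvG]; simp [g1], hm⟩
      · exact ⟨by rw [pvG]; simp [g1, g2], hm⟩
      · exact ⟨by rw [pvG]; simp [g1, g2, g3], hm⟩
      · rcases hget : m[(i, t)]? with _ | v
        · simp only
          obtain ⟨h11, h12⟩ := ih (i - 1) t m (by omega) hm
          obtain ⟨h21, h22⟩ := ih (i - 1) (t - i) (pvCount (i - 1) t m).2 (by omega) h12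
          refine ⟨by simp [h11, h21, hguard g1 g2 g3], ?_⟩
          intro i' t' v' hv'
          rw [Std.HashMap.getElem?_insert] at hv'
          split_ifs at hv' with he
          · rw [beq_iff_eq] at he
            cases he
            cases hv'
            simp [h11, h21, hguard g1 g2 g3]
          · exact h22 i' t' v' hv'
        · simp only
          exact ⟨hm i t v hget, hm⟩

-- one write of A's inner loop, seen through getD
lemma pvSetGet (X : Array Int) (j s v : Int) (hj0 : 0 ≤ j) (hjsz : j < (X.size : Int)) (hs0 : 0 ≤ s) :
    (X.setIfInBounds j.toNat v).getD s.toNat 0 = if s = j then v else X.getD s.toNat 0 := by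
  rw [Array.getD_eq_getD_getElem?, Array.getD_eq_getD_getElem?, Array.getElem?_setIfInBounds]
  split_ifs <;> first | rfl | (exfalso; omega)

-- A-side: characterisation of the DP array.  (inner loop, one newNum = k)
lemma pvInner_spec (k M L : Int) (hk : 1 ≤ k) (hM : 2 * M = k * (k + 1)) (hML : M < L) :
    ∀ (c : Nat) (dp : Array Int), (c : Int) ≤ M - k + 1 → dp.size = L.toNat →
      (∀ s : Int, 0 ≤ s → s < L →
        dp.getD s.toNat 0 = if M < s then pvG k s else pvG (k - 1) s) →
      (((List.range c).map (fun j : Nat => M - (j : Int))).foldl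
          (fun dp totalSum =>
            dp.setIfInBounds totalSum.toNat
              (dp.getD totalSum.toNat 0 + dp.getD (totalSum - k).toNat 0))
          dp).size = L.toNat ∧
      (∀ s : Int, 0 ≤ s → s < L →
        (((List.range c).map (fun j : Nat => M - (j : Int))).foldl
          (fun dp totalSum =>
            dp.setIfInBounds totalSum.toNat
              (dp.getD totalSum.toNat 0 + dp.getD (totalSum - k).toNat 0))
          dp).getD s.toNat 0 = if M - c < s then pvG k s else pvG (k - 1) s) := by
  have hMk : k ≤ M := by nlinarith
  intro c
  induction c with
  | zero =>
      intro dp hc hlen hinv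
      refine ⟨by simp only [List.range_zero, List.map_nil, List.foldl_nil]; exact hlen, ?_⟩
      intro s h0 h1
      simp only [List.range_zero, List.map_nil, List.foldl_nil, Nat.cast_zero, sub_zero]
      exact hinv s h0 h1
  | succ c ih =>
      intro dp hc hlen hinv
      have hc' : (c : Int) ≤ M - k + 1 := by push_cast at hc ⊢; omega
      have hcM : (c : Int) ≤ M - k := by push_cast at hc; omega
      obtain ⟨xlen, xinv⟩ := ih dp hc' hlen hinv
      set X := ((List.range c).map (fun j : Nat => M - (j : Int))).foldl
          (fun dp totalSum =>
            dp.setIfInBounds totalSum.toNat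
              (dp.getD totalSum.toNat 0 + dp.getD (totalSum - k).toNat 0))
          dp with hX
      rw [List.range_succ, List.map_append, List.foldl_append]
      simp only [List.map_cons, List.map_nil, List.foldl_cons, List.foldl_nil]
      rw [← hX]
      set j : Int := M - (c : Int) with hjdef
      have hj0 : 0 ≤ j := by omega
      have hjk : k ≤ j := by omega
      have hjL : j < L := by omega
      have hjsz : j < (X.size : Int) := by rw [xlen]; omega
      have hXj : X.getD j.toNat 0 = pvG (k - 1) j := by
        rw [xinv j hj0 hjL]
        split_ifs with h
        · exact absurd h (by omega)
        · rfl
      have hXjk : X.getD (j - k).toNat 0 = pvG (k - 1) (j - k) := by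
        rw [xinv (j - k) (by omega) (by omega)]
        split_ifs with h
        · exact absurd h (by omega)
        · rfl
      have hrec : pvG k j = pvG (k - 1) j + pvG (k - 1) (j - k) := by
        rw [pvG]
        simp [show ¬ j = 0 by omega, show ¬ k ≤ 0 by omega, show ¬ j < 0 by omega]
      have hval : X.getD j.toNat 0 + X.getD (j - k).toNat 0 = pvG k j := by
        rw [hXj, hXjk, hrec]
      refine ⟨by rw [Array.size_setIfInBounds, xlen], ?_⟩
      intro s h0 h1
      rw [pvSetGet X j s _ hj0 hjsz h0]
      by_cases he : s = j
      · subst he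
        rw [if_pos rfl, if_pos (by push_cast; omega), hval]
      · rw [if_neg he, xinv s h0 h1]
        by_cases hlt : M - (c : Int) < s
        · rw [if_pos hlt, if_pos (by push_cast; omega)]
        · rw [if_neg hlt, if_neg (by push_cast; omega)]

lemma pvOuter_spec (L : Int) (_hL : 0 < L) :
    ∀ (n : Nat) (dp : Array Int), (n : Int) * ((n : Int) + 1) ≤ 2 * (L - 1) →
      dp.size = L.toNat →
      (∀ s : Int, 0 ≤ s → s < L → dp.getD s.toNat 0 = pvG 0 s) →
      (((List.range n).map (fun j : Nat => 1 + (j : Int))).foldl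
          (fun dp newNum =>
            (PySem.List.pyRange (PySem.Int.floordiv (newNum * (newNum + 1)) 2) (newNum - 1) (-1)).foldl
              (fun dp totalSum =>
                dp.setIfInBounds totalSum.toNat
                  (dp.getD totalSum.toNat 0 + dp.getD (totalSum - newNum).toNat 0))
              dp)
          dp).size = L.toNat ∧
      (∀ s : Int, 0 ≤ s → s < L →
        (((List.range n).map (fun j : Nat => 1 + (j : Int))).foldl
          (fun dp newNum =>
            (PySem.List.pyRange (PySem.Int.floordiv (newNum * (newNum + 1)) 2) (newNum - 1) (-1)).foldl
              (fun dp totalSum =>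
                dp.setIfInBounds totalSum.toNat
                  (dp.getD totalSum.toNat 0 + dp.getD (totalSum - newNum).toNat 0))
              dp)
          dp).getD s.toNat 0 = pvG (n : Int) s) := by
  intro n
  induction n with
  | zero =>
      intro dp hb hlen hinv
      refine ⟨by simp only [List.range_zero, List.map_nil, List.foldl_nil]; exact hlen, ?_⟩
      intro s h0 h1
      simp only [List.range_zero, List.map_nil, List.foldl_nil, Nat.cast_zero]
      exact hinv s h0 h1
  | succ n ih =>
      intro dp hb hlen hinv
      have hb' : (n : Int) * ((n : Int) + 1) ≤ 2 * (L - 1) := by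
        push_cast at hb ⊢; nlinarith
      obtain ⟨xlen, xinv⟩ := ih dp hb' hlen hinv
      set X := ((List.range n).map (fun j : Nat => 1 + (j : Int))).foldl
          (fun dp newNum =>
            (PySem.List.pyRange (PySem.Int.floordiv (newNum * (newNum + 1)) 2) (newNum - 1) (-1)).foldl
              (fun dp totalSum =>
                dp.setIfInBounds totalSum.toNat
                  (dp.getD totalSum.toNat 0 + dp.getD (totalSum - newNum).toNat 0))
              dp)
          dp with hX
      rw [List.range_succ, List.map_append, List.foldl_append]
      simp only [List.map_cons, List.map_nil, List.foldl_cons, List.foldl_nil]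
      rw [← hX]
      set k : Int := 1 + (n : Int) with hkdef
      have hk1 : 1 ≤ k := by omega
      have hn0 : (0:Int) ≤ (n : Int) := Int.natCast_nonneg n
      obtain ⟨r, hr⟩ : Even (k * (k + 1)) := Int.even_mul_succ_self k
      have hrM : PySem.Int.floordiv (k * (k + 1)) 2 = r := by
        rw [PySem.Int.floordiv_eq_iff_of_pos (by omega)]
        constructor <;> omega
      set M : Int := PySem.Int.floordiv (k * (k + 1)) 2 with hMdef
      have hM2 : 2 * M = k * (k + 1) := by rw [hrM]; omega
      have hkk : k * (k + 1) ≤ 2 * (L - 1) := by push_cast at hb; nlinarith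
      have hML : M < L := by omega
      have hMk : k ≤ M := by nlinarith
      have hrange : PySem.List.pyRange M (k - 1) (-1) =
          (List.range (M - k + 1).toNat).map (fun j : Nat => M - (j : Int)) := by
        rw [PySem.List.pyRange_neg_one]
        congr 2
        omega
      have hc : ((M - k + 1).toNat : Int) ≤ M - k + 1 := by omega
      have hxinv : ∀ s : Int, 0 ≤ s → s < L →
          X.getD s.toNat 0 = if M < s then pvG k s else pvG (k - 1) s := by
        intro s h0 h1
        rw [xinv s h0 h1]
        split_ifs with h
        · have hz1 : pvG k s = 0 := by
            apply pvG_zero_of_big k.toNat k s le_rfl (by omega)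
            omega
          have hz2 : pvG (n : Int) s = 0 := by
            apply pvG_zero_of_big n (n : Int) s (by omega) (by omega)
            nlinarith
          rw [hz1, hz2]
        · congr 1
          omega
      obtain ⟨flen, finv⟩ := pvInner_spec k M L hk1 hM2 hML (M - k + 1).toNat X hc xlen hxinv
      rw [hrange]
      refine ⟨flen, ?_⟩
      intro s h0 h1
      rw [finv s h0 h1]
      have hMc : M - ((M - k + 1).toNat : Int) = k - 1 := by omega
      rw [hMc]
      split_ifs with h
      · congr 1
        push_cast
        omega
      · rw [← pvG_lt k s h0 (by omega)]
        congr 1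
        push_cast
        omega

-- ===== VERDICT (by name: the statement is the Claim_ definition above) =====
theorem numberOfSubsets_spec : Claim_equal_numberOfSubsets := by
  intro N _
  unfold Spec_numberOfSubsets
  by_cases hg : PySem.Int.mod (N * (N + 1)) 4 ≠ 0
  · simp only [numberOfSubsets, numberOfSubsets_alt, if_pos hg]
  · rw [ne_eq, not_not] at hg
    have hNN : 0 ≤ N * (N + 1) := by nlinarith [sq_nonneg (2 * N + 1)]
    obtain ⟨r, hr⟩ : Even (N * (N + 1)) := Int.even_mul_succ_self N
    have hS : PySem.Int.floordiv (N * (N + 1)) 2 = r := by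
      rw [PySem.Int.floordiv_eq_iff_of_pos (by omega)]
      constructor <;> omega
    set S : Int := PySem.Int.floordiv (N * (N + 1)) 2 with hSdef
    have h2S : 2 * S = N * (N + 1) := by rw [hS]; omega
    obtain ⟨u, hu⟩ : (4:Int) ∣ N * (N + 1) := (PySem.Int.mod_eq_zero_iff_dvd _ _).mp hg
    have hT : PySem.Int.floordiv (N * (N + 1)) 4 = u := by
      rw [PySem.Int.floordiv_eq_iff_of_pos (by omega)]
      constructor <;> omega
    set T : Int := PySem.Int.floordiv (N * (N + 1)) 4 with hTdef
    have h4T : 4 * T = N * (N + 1) := by rw [hT]; omega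
    have hS0 : 0 ≤ S := by linarith
    have hT0 : 0 ≤ T := by linarith
    have hTS : T ≤ S := by linarith
    set L : Int := S + 1 with hLdef
    have hL : 0 < L := by omega
    -- the initial array dp1 = ([0] * (S+1)) with dp1[0] = 1
    set dp1 : Array Int := (Array.replicate (S + 1).toNat 0).setIfInBounds (0 : Int).toNat 1 with hdp1
    have hlen1 : dp1.size = L.toNat := by
      rw [hdp1, Array.size_setIfInBounds, Array.size_replicate]
    have hbase : ∀ s : Int, 0 ≤ s → s < L → dp1.getD s.toNat 0 = pvG 0 s := by
      intro s h0 h1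
      have hsz : s.toNat < (S + 1).toNat := by omega
      rw [hdp1, Array.getD_eq_getD_getElem?, Array.getElem?_setIfInBounds, pvG_nonpos 0 s le_rfl]
      by_cases he : s = 0
      · subst he
        rw [if_pos rfl, if_pos (by rw [Array.size_replicate]; omega)]
        simp
      · rw [if_neg (by omega), Array.getElem?_replicate, if_pos hsz]
        simp [he]
    have hrange1 : PySem.List.pyRange 1 (N + 1) 1 =
        (List.range N.toNat).map (fun j : Nat => 1 + (j : Int)) := by
      rw [PySem.List.pyRange_one]
      congr 2
      omega
    have hbound : (N.toNat : Int) * ((N.toNat : Int) + 1) ≤ 2 * (L - 1) := by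
      by_cases h : 0 ≤ N
      · rw [Int.toNat_of_nonneg h]
        linarith
      · rw [Int.toNat_of_nonpos (by omega)]
        simp only [Nat.cast_zero, zero_mul]
        linarith
    obtain ⟨flen, finv⟩ := pvOuter_spec L hL N.toNat dp1 hbound hlen1 hbase
    have hAN : pvG ((N.toNat : Int)) T = pvG N T := by
      by_cases h : 0 ≤ N
      · rw [Int.toNat_of_nonneg h]
      · rw [Int.toNat_of_nonpos (by omega)]
        simp only [Nat.cast_zero]
        rw [pvG_nonpos 0 T le_rfl, pvG_nonpos N T (by omega)]
    have hempty : pvInv ∅ := by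
      intro i t v hv
      rw [Std.HashMap.getElem?_empty] at hv
      exact absurd hv (by simp)
    obtain ⟨hcnt, -⟩ := pvCount_spec N.toNat N T ∅ le_rfl hempty
    simp only [numberOfSubsets, numberOfSubsets_alt, if_neg (by omega : ¬ PySem.Int.mod (N * (N + 1)) 4 ≠ 0)]
    rw [← hSdef, ← hTdef, ← hdp1, hrange1, hcnt, ← hAN, finv T hT0 (by omega)]
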